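-- pv_equiv track=rewrite | github.com/JRowbottomGit/g-adaptivity | src/run_pipeline_georg.py | compare_dicts_with_exceptions
-- ===== SOURCE A (Python) =====
-- def compare_dicts_with_exceptions(dict1, dict2, ignore_keys=None):
--     if ignore_keys is None:
--         ignore_keys = []
--
--     keys1 = set(dict1.keys()) - set(ignore_keys)
--     keys2 = set(dict2.keys()) - set(ignore_keys)
--
--     common_keys = keys1 & keys2
--     added_keys = keys2 - keys1
--     removed_keys = keys1 - keys2
--
--     modified_keys = {key for key in common_keys if dict1[key] != dict2[key]}
--
--     return modified_keys
-- ===== SOURCE B (Python) =====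
-- def compare_dicts_with_exceptions(dict1, dict2, ignore_keys=None):
--     # Keys whose (key, value) pair occurs in exactly one of the two dicts,
--     # restricted to keys present in both, minus the ignored keys.
--     changed = {k for k, _ in dict1.items() ^ dict2.items()}
--     changed &= dict1.keys() & dict2.keys()
--     return changed - set(ignore_keys or ())
-- ===== Notes on version B (the rewrite author's own statement) =====
-- stated objective: alternative
-- what changed: Instead of A's per-key value comparison over the ignore-filtered common keys, B takes the symmetric difference of the two items() views (pairs present in exactly one dict), keeps its keys, intersects with both key views and subtracts the ignored keys.
import Mathlib
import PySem

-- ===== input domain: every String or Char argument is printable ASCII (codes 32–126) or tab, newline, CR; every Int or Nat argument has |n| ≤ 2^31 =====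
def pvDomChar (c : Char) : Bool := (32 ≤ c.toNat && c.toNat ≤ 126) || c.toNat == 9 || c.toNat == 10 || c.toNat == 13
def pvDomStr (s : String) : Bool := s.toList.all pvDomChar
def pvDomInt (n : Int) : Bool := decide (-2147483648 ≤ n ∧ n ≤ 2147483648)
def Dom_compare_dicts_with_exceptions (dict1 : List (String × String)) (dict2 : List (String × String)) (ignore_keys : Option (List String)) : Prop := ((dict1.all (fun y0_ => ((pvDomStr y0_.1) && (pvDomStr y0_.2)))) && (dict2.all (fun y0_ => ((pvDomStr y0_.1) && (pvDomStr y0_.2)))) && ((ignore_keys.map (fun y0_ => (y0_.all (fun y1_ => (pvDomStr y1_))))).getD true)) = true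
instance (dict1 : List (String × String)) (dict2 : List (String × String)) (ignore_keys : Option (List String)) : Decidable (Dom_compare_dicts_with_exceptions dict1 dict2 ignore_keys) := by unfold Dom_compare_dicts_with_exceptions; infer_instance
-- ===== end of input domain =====

-- ===== PORT A =====
-- B replaces A's per-key value-comparison over the common keys with the items-view
-- symmetric difference dict1.items() ^ dict2.items() (alternative decomposition).
def compare_dicts_with_exceptions (dict1 : List (String × String)) (dict2 : List (String × String)) (ignore_keys : Option (List String)) : List String :=
  let ignore_keys' := ignore_keys.getD []                     -- if ignore_keys is None: ignore_keys = []
  let d1 := PySem.Dict.ofList dict1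
  let d2 := PySem.Dict.ofList dict2
  let keys1 := PySem.Set.diff (PySem.Set.ofList d1.keys) (PySem.Set.ofList ignore_keys')
  let keys2 := PySem.Set.diff (PySem.Set.ofList d2.keys) (PySem.Set.ofList ignore_keys')
  let common_keys := PySem.Set.inter keys1 keys2
  let _added_keys := PySem.Set.diff keys2 keys1               -- computed by A, never used
  let _removed_keys := PySem.Set.diff keys1 keys2             -- computed by A, never used
  PySem.Set.ofList (common_keys.filter (fun key => d1.get? key != d2.get? key))

-- ===== PORT B =====
def compare_dicts_with_exceptions_alt (dict1 : List (String × String)) (dict2 : List (String × String)) (ignore_keys : Option (List String)) : List String :=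
  let d1 := PySem.Dict.ofList dict1
  let d2 := PySem.Dict.ofList dict2
  -- changed = {k for k, _ in dict1.items() ^ dict2.items()}
  let changed : PySem.Set String :=
    PySem.Set.ofList ((PySem.Set.symmDiff (PySem.Set.ofList d1.items) (PySem.Set.ofList d2.items)).map (fun p => p.1))
  -- changed &= dict1.keys() & dict2.keys()
  let changed := PySem.Set.inter changed (PySem.Set.inter (PySem.Set.ofList d1.keys) (PySem.Set.ofList d2.keys))
  -- return changed - set(ignore_keys or ())
  PySem.Set.diff changed (PySem.Set.ofList (ignore_keys.getD []))

-- ===== PRECONDITION & SPEC =====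
def Spec_compare_dicts_with_exceptions (dict1 : List (String × String)) (dict2 : List (String × String)) (ignore_keys : Option (List String)) (out : List String) : Prop := out = compare_dicts_with_exceptions_alt dict1 dict2 ignore_keys
instance (dict1 : List (String × String)) (dict2 : List (String × String)) (ignore_keys : Option (List String)) (out : List String) : Decidable (Spec_compare_dicts_with_exceptions dict1 dict2 ignore_keys out) := by unfold Spec_compare_dicts_with_exceptions; infer_instance

-- ===== CLAIM (what is proved, stated in full; the proofs are below) =====
def Claim_equal_compare_dicts_with_exceptions : Prop := ∀ (dict1 : List (String × String)) (dict2 : List (String × String)) (ignore_keys : Option (List String)), Dom_compare_dicts_with_exceptions dict1 dict2 ignore_keys → Spec_compare_dicts_with_exceptions dict1 dict2 ignore_keys (compare_dicts_with_exceptions dict1 dict2 ignore_keys)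

-- ===== LEMMAS AND PROOFS =====

theorem pv_core (d1 d2 : PySem.Dict String String) (hn1 : d1.keys.Nodup) (hn2 : d2.keys.Nodup)
    (ig : List String) :
    PySem.Set.ofList ((PySem.Set.inter
        (PySem.Set.diff (PySem.Set.ofList d1.keys) (PySem.Set.ofList ig))
        (PySem.Set.diff (PySem.Set.ofList d2.keys) (PySem.Set.ofList ig))).filter
      (fun key => d1.get? key != d2.get? key))
    = PySem.Set.diff
        (PySem.Set.inter
          (PySem.Set.ofList ((PySem.Set.symmDiff (PySem.Set.ofList d1.items) (PySem.Set.ofList d2.items)).map (fun p => p.1)))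
          (PySem.Set.inter (PySem.Set.ofList d1.keys) (PySem.Set.ofList d2.keys)))
        (PySem.Set.ofList ig) := by
  have hi1 : d1.items.Nodup := List.Nodup.of_map _ hn1
  have hi2 : d2.items.Nodup := List.Nodup.of_map _ hn2
  rw [PySem.Set.ofList_eq_self_of_nodup _ hn1, PySem.Set.ofList_eq_self_of_nodup _ hn2,
      PySem.Set.ofList_eq_self_of_nodup _ hi1, PySem.Set.ofList_eq_self_of_nodup _ hi2]
  set L1 : List String := (d1.items.filter (fun p => !(List.contains d2.items p))).map (fun p => p.1) with hL1
  set L2 : List String := (d2.items.filter (fun p => !(List.contains d1.items p))).map (fun p => p.1) with hL2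
  have hsymm : (PySem.Set.symmDiff d1.items d2.items).map (fun p : String × String => p.1) = L1 ++ L2 := by
    have h0 : PySem.Set.symmDiff (α := String × String) d1.items d2.items
        = PySem.Set.diff d1.items d2.items ++ PySem.Set.diff d2.items d1.items := rfl
    rw [h0, List.map_append]
    rfl
  rw [hsymm]
  have hL1sub : L1.Sublist d1.keys := by
    have h := (List.filter_sublist (p := fun p : String × String => !(List.contains d2.items p)) (l := d1.items)).map (fun p : String × String => p.1)
    simpa [hL1, PySem.Dict.keys] using h
  have hL1nd : L1.Nodup := hn1.sublist hL1sub
  rw [PySem.Set.ofList_append, PySem.Set.update_eq_append_filter,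
      PySem.Set.ofList_eq_self_of_nodup _ hL1nd]
  show PySem.Set.ofList _ = List.filter _ (List.filter _ (L1 ++ _))
  rw [List.filter_append]
  -- the L2 half dies after intersecting with d1.keys & d2.keys
  have hdead : List.filter
      (fun x => (PySem.Set.inter (d1.keys : PySem.Set String) (d2.keys : PySem.Set String)).contains x)
      (List.filter (fun y => !PySem.Set.contains L1 y) (PySem.Set.ofList L2)) = [] := by
    rw [List.filter_eq_nil_iff]
    intro y hy hmem
    rw [List.mem_filter] at hy
    obtain ⟨hyL2, hnotL1⟩ := hy
    have hyK : y ∈ d1.keys ∧ y ∈ d2.keys := by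
      have h := (PySem.Set.contains_iff _ _).mp hmem
      rwa [PySem.Set.mem_inter] at h
    rw [PySem.Set.mem_ofList, hL2, List.mem_map] at hyL2
    obtain ⟨p, hp, hpy⟩ := hyL2
    obtain ⟨py, pw⟩ := p
    simp only at hpy
    subst hpy
    rw [List.mem_filter] at hp
    obtain ⟨hpI2, hpnotI1⟩ := hp
    have hv1 : ∃ v1, d1.get? py = some v1 := by
      have h : d1.contains py = true := by
        rw [PySem.Dict.contains_iff_mem_keys]; exact hyK.1
      rw [PySem.Dict.contains_eq_isSome_get?] at h
      exact Option.isSome_iff_exists.mp h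
    obtain ⟨v1, hv1⟩ := hv1
    have hyv1I1 : (py, v1) ∈ d1.items := PySem.Dict.mem_items_of_get?_eq_some d1 hv1
    have hg2 : d2.get? py = some pw := PySem.Dict.get?_of_mem_items d2 hpI2 hn2
    have hne : pw ≠ v1 := by
      intro he
      subst he
      simp only [Bool.not_eq_true'] at hpnotI1
      simp at hpnotI1
      exact hpnotI1 hyv1I1
    have hnotI2 : (py, v1) ∉ d2.items := by
      intro h
      have h2 := PySem.Dict.get?_of_mem_items d2 h hn2
      rw [hg2] at h2
      exact hne (by simpa using h2)
    have hyL1 : py ∈ L1 := by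
      rw [hL1, List.mem_map]
      refine ⟨(py, v1), ?_, rfl⟩
      rw [List.mem_filter]
      refine ⟨hyv1I1, ?_⟩
      simpa [List.contains_iff_mem] using hnotI2
    simp [PySem.Set.contains_eq_listContains, hyL1] at hnotL1
  rw [hdead, List.append_nil]
  -- both sides are now filters of d1-derived lists; collapse to filters over d1.items
  have hLHSdef : ((PySem.Set.diff (d1.keys : PySem.Set String) (PySem.Set.ofList ig)).inter
        (PySem.Set.diff (d2.keys : PySem.Set String) (PySem.Set.ofList ig)))
      = List.filter (fun x => (PySem.Set.diff (d2.keys : PySem.Set String) (PySem.Set.ofList ig)).contains x)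
          (List.filter (fun x => !(PySem.Set.ofList ig).contains x) d1.keys) := rfl
  rw [hLHSdef, List.filter_filter, List.filter_filter, List.filter_filter]
  have hkeys : d1.keys = d1.items.map (fun p : String × String => p.1) := rfl
  rw [hL1, hkeys, List.filter_map, List.filter_map, List.filter_filter]
  have hnd : ∀ q : String × String → Bool,
      ((d1.items.filter q).map (fun p : String × String => p.1)).Nodup := by
    intro q
    exact hn1.sublist ((List.filter_sublist).map _)
  rw [PySem.Set.ofList_eq_self_of_nodup _ (hnd _)]
  congr 1
  apply List.filter_congr
  intro p hp
  obtain ⟨py, pw⟩ := p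
  have hg1 : d1.get? py = some pw := PySem.Dict.get?_of_mem_items d1 hp hn1
  have hk1 : py ∈ d1.keys := by
    rw [hkeys, List.mem_map]; exact ⟨(py, pw), hp, rfl⟩
  have hm2 : ((py, pw) ∈ d2.items) ↔ d2.get? py = some pw :=
    (PySem.Dict.get?_eq_some_iff_mem_items d2 py pw hn2).symm
  rw [Bool.eq_iff_iff]
  simp [Function.comp, bne_iff_ne, PySem.Set.contains_eq_listContains, List.contains_iff_mem,
    PySem.Set.mem_diff, PySem.Set.mem_inter, PySem.Set.mem_ofList, hm2, hg1, hk1]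
  tauto

-- ===== VERDICT (by name: the statement is the Claim_ definition above) =====
theorem compare_dicts_with_exceptions_spec : Claim_equal_compare_dicts_with_exceptions := by
  intro dict1 dict2 ik _
  unfold Spec_compare_dicts_with_exceptions
  exact pv_core (PySem.Dict.ofList dict1) (PySem.Dict.ofList dict2)
    (PySem.Dict.nodup_keys_ofList dict1) (PySem.Dict.nodup_keys_ofList dict2) (ik.getD [])
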